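-- pv_equiv track=rewrite | github.com/atseng1729/Kattis-Problems | medium_problems/judgin_troubles.py | solution
-- ===== SOURCE A (Python) =====
-- def solution(arr1, arr2):
--     output1 = dict()
--     for i in arr1:
--         if i not in output1.keys():
--             output1[i] = 1
--         else:
--             output1[i] += 1
--     output2 = dict()
--     for i in arr2:
--         if i not in output2.keys():
--             output2[i] = 1
--         else:
--             output2[i] += 1
--
--     ans = 0
--     for i in output1.keys():
--         if i not in output2.keys(): pass
--         else: ans += min(output1[i], output2[i])
--     return ans
-- ===== SOURCE B (Python) =====
-- def solution(arr1, arr2):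
--     # Greedy matching: count arr2 once, then consume one occurrence per
--     # matching element while scanning arr1 in a single pass.
--     remaining = {}
--     for x in arr2:
--         remaining[x] = remaining.get(x, 0) + 1
--     ans = 0
--     for x in arr1:
--         if remaining.get(x, 0) > 0:
--             remaining[x] -= 1
--             ans += 1
--     return ans
-- ===== Notes on version B (the rewrite author's own statement) =====
-- stated objective: alternative
-- what changed: A builds two frequency dicts and sums min(count1,count2) over the first dict's keys; B builds one counter of arr2 and greedily consumes it in a single pass over arr1, counting successful matches.
import Mathlib
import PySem

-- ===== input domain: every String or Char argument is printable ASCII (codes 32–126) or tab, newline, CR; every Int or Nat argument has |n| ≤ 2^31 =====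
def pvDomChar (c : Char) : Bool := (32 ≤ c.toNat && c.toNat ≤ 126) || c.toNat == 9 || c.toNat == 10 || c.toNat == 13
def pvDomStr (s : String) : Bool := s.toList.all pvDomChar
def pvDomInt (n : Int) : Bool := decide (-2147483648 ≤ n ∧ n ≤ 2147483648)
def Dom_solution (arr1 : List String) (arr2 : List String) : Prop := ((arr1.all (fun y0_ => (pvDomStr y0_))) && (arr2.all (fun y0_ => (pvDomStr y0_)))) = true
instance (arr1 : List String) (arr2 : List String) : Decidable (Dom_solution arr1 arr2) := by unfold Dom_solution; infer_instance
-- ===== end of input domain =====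

-- B replaces A's two frequency dicts and min-summation by a single counter of arr2
-- consumed greedily in one pass over arr1 (objective: alternative algorithm).

-- ===== PORT A =====
-- output1[i] += 1 on an existing key is ported as insert i (getD i 0 + 1); the key is present, so getD reads its value.
def solution (arr1 : List String) (arr2 : List String) : Int :=
  let output1 := arr1.foldl (fun d i =>
    if d.contains i = false then d.insert i 1 else d.insert i (d.getD i 0 + 1)) PySem.Dict.empty
  let output2 := arr2.foldl (fun d i =>
    if d.contains i = false then d.insert i 1 else d.insert i (d.getD i 0 + 1)) PySem.Dict.empty
  output1.keys.foldl (fun ans i =>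
    if output2.contains i = false then ans
    else ans + min (output1.getD i 0) (output2.getD i 0)) 0

-- ===== PORT B =====
def solution_alt (arr1 : List String) (arr2 : List String) : Int :=
  let remaining := arr2.foldl (fun d x => d.insert x (d.getD x 0 + 1))
    (PySem.Dict.empty : PySem.Dict String Int)
  let st := arr1.foldl (fun (s : PySem.Dict String Int × Int) x =>
    if 0 < s.1.getD x 0 then (s.1.insert x (s.1.getD x 0 - 1), s.2 + 1) else s) (remaining, 0)
  st.2

-- ===== PRECONDITION & SPEC =====
def Spec_solution (arr1 : List String) (arr2 : List String) (out : Int) : Prop := out = solution_alt arr1 arr2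
instance (arr1 : List String) (arr2 : List String) (out : Int) : Decidable (Spec_solution arr1 arr2 out) := by unfold Spec_solution; infer_instance

-- ===== CLAIM (what is proved, stated in full; the proofs are below) =====
def Claim_equal_solution : Prop := ∀ (arr1 : List String) (arr2 : List String), Dom_solution arr1 arr2 → Spec_solution arr1 arr2 (solution arr1 arr2)

-- ===== LEMMAS AND PROOFS =====

-- A's hand-written counting loop builds exactly the counter.
lemma countA_eq_counter (l : List String) :
    l.foldl (fun d i =>
      if d.contains i = false then d.insert i 1 else d.insert i (d.getD i 0 + 1))
      (PySem.Dict.empty : PySem.Dict String Int) = PySem.Dict.counter l := by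
  rw [← PySem.Dict.foldl_insert_getD_add_one_eq_counter]
  congr 1
  funext d i
  by_cases h : d.contains i
  · simp [h]
  · simp only [Bool.not_eq_true] at h
    rw [if_pos h, PySem.Dict.getD_of_not_contains d 0 h]
    norm_num

-- Functional model of B's consuming loop (proof helper).
def pvMatched : List String → (String → Int) → Int
  | [], _ => 0
  | x :: l, f =>
    if 0 < f x then 1 + pvMatched l (fun k => if k = x then f x - 1 else f k)
    else pvMatched l f

lemma foldB_eq_pvMatched : ∀ (l : List String) (d : PySem.Dict String Int) (ans : Int),
    (l.foldl (fun (s : PySem.Dict String Int × Int) x =>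
      if 0 < s.1.getD x 0 then (s.1.insert x (s.1.getD x 0 - 1), s.2 + 1) else s) (d, ans)).2
      = ans + pvMatched l (fun k => d.getD k 0)
  | [], d, ans => by simp [pvMatched]
  | x :: l, d, ans => by
    simp only [List.foldl_cons, pvMatched]
    by_cases h : 0 < d.getD x 0
    · simp only [h, if_pos]
      rw [foldB_eq_pvMatched l]
      have hf : (fun k => (d.insert x (d.getD x 0 - 1)).getD k 0)
          = (fun k => if k = x then d.getD x 0 - 1 else d.getD k 0) := by
        funext k; rw [PySem.Dict.getD_insert]
      rw [hf]; omega
    · simp only [h, if_false]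
      exact foldB_eq_pvMatched l d ans

lemma pvMatched_eq_sum (S : Finset String) :
    ∀ (l : List String) (f : String → Int), (∀ k, 0 ≤ f k) → (∀ k ∈ l, k ∈ S) →
    pvMatched l f = ∑ k ∈ S, min ((l.count k : Int)) (f k)
  | [], f, hf, _ => by
    simp only [pvMatched, List.count_nil]
    rw [Finset.sum_eq_zero]
    intro k _
    have := hf k; omega
  | x :: l, f, hf, hS => by
    have hx : x ∈ S := hS x (List.mem_cons_self ..)
    simp only [pvMatched]
    by_cases h : 0 < f x
    · rw [if_pos h,
        pvMatched_eq_sum S l _ (by intro k; by_cases hk : k = x <;> simp [hk] <;> [omega; exact hf k])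
          (fun k hk => hS k (List.mem_cons_of_mem _ hk)),
        ← Finset.add_sum_erase _ _ hx, ← Finset.add_sum_erase _ _ hx]
      have herase : ∑ k ∈ S.erase x, min ((l.count k : Int)) (if k = x then f x - 1 else f k)
          = ∑ k ∈ S.erase x, min (((x :: l).count k : Int)) (f k) := by
        refine Finset.sum_congr rfl (fun k hk => ?_)
        have hne : k ≠ x := Finset.ne_of_mem_erase hk
        rw [if_neg hne, List.count_cons, if_neg (by simpa using (Ne.symm hne))]
        simp
      rw [herase]
      have hcx : ((x :: l).count x : Int) = (l.count x : Int) + 1 := by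
        rw [List.count_cons]; simp
      rw [hcx, if_pos rfl]
      omega
    · rw [if_neg h,
        pvMatched_eq_sum S l f hf (fun k hk => hS k (List.mem_cons_of_mem _ hk)),
        ← Finset.add_sum_erase _ _ hx, ← Finset.add_sum_erase _ _ hx]
      have herase : ∑ k ∈ S.erase x, min ((l.count k : Int)) (f k)
          = ∑ k ∈ S.erase x, min (((x :: l).count k : Int)) (f k) := by
        refine Finset.sum_congr rfl (fun k hk => ?_)
        have hne : k ≠ x := Finset.ne_of_mem_erase hk
        rw [List.count_cons, if_neg (by simpa using (Ne.symm hne))]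
        simp
      rw [herase]
      have hcx : ((x :: l).count x : Int) = (l.count x : Int) + 1 := by
        rw [List.count_cons]; simp
      rw [hcx]
      have hfx0 : f x = 0 := le_antisymm (by omega) (hf x)
      rw [hfx0]
      omega

-- closed form shared by both ports
lemma solution_alt_eq_sum (arr1 arr2 : List String) :
    solution_alt arr1 arr2
      = ∑ k ∈ arr1.toFinset, min ((arr1.count k : Int)) ((arr2.count k : Int)) := by
  unfold solution_alt
  rw [PySem.Dict.foldl_insert_getD_add_one_eq_counter, foldB_eq_pvMatched]
  have hf : (fun k => (PySem.Dict.counter arr2).getD k 0) = (fun k => (arr2.count k : Int)) := by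
    funext k; rw [PySem.Dict.getD_counter]
  rw [hf, pvMatched_eq_sum arr1.toFinset arr1 _ (by intro k; positivity)
    (by intro k hk; simpa using hk)]
  omega

lemma foldA_counter (arr1 arr2 : List String) :
    (PySem.Dict.counter arr1).keys.foldl (fun ans i =>
      if (PySem.Dict.counter arr2).contains i = false then ans
      else ans + min ((PySem.Dict.counter arr1).getD i 0) ((PySem.Dict.counter arr2).getD i 0)) 0
      = ∑ k ∈ arr1.toFinset, min ((arr1.count k : Int)) ((arr2.count k : Int)) := by
  have hstep : (fun (ans : Int) i =>
      if (PySem.Dict.counter arr2).contains i = false then ans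
      else ans + min ((PySem.Dict.counter arr1).getD i 0) ((PySem.Dict.counter arr2).getD i 0))
      = (fun ans i => ans + (if (PySem.Dict.counter arr2).contains i = false then 0
      else min ((PySem.Dict.counter arr1).getD i 0) ((PySem.Dict.counter arr2).getD i 0))) := by
    funext a k
    by_cases h : (PySem.Dict.counter arr2).contains k <;> simp [h]
  rw [hstep, PySem.List.foldl_add, zero_add, PySem.Dict.keys_counter,
    ← PySem.List.dedup_eq_ofList, ← List.sum_toFinset _ (PySem.List.nodup_dedup arr1)]
  have hfs : (PySem.List.dedup arr1).toFinset = arr1.toFinset := by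
    ext k; simp
  rw [hfs]
  refine Finset.sum_congr rfl (fun k _ => ?_)
  rw [PySem.Dict.contains_counter, PySem.Dict.getD_counter, PySem.Dict.getD_counter]
  by_cases h : arr2.contains k
  · have hm : k ∈ arr2 := by simpa using h
    simp [hm]
  · simp only [Bool.not_eq_true] at h
    have h2 : arr2.count k = 0 := by
      rw [List.count_eq_zero]
      simpa using h
    simp [h2]

lemma solution_eq_sum (arr1 arr2 : List String) :
    solution arr1 arr2
      = ∑ k ∈ arr1.toFinset, min ((arr1.count k : Int)) ((arr2.count k : Int)) := by
  unfold solution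
  rw [countA_eq_counter, countA_eq_counter]
  exact foldA_counter arr1 arr2

-- ===== VERDICT (by name: the statement is the Claim_ definition above) =====
theorem solution_spec : Claim_equal_solution := by
  intro arr1 arr2 _
  unfold Spec_solution
  rw [solution_eq_sum, solution_alt_eq_sum]
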